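-- pv_equiv track=rewrite | github.com/kujirahand/book-generativeai-sample | src/ch4/calc_coin.py | calc_coin
-- ===== SOURCE A (Python) =====
-- def calc_coin(total, a, b, c, d):
--     # 組み合わせの初期値を設定
--     min_coins = float('inf')  # 最小のコイン枚数を無限大に設定
--     result = None  # 結果の変数を初期化
--
--     # 10円玉のループ
--     for i in range(a + 1):
--         # 50円玉のループ
--         for j in range(b + 1):
--             # 100円玉のループ
--             for k in range(c + 1):
--                 # 500円玉のループ
--                 for l in range(d + 1):
--                     # 合計金額の計算
--                     total_amount = i * 10 + j * 50 + k * 100 + l * 500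
--                     # コインの枚数が最小かつ合計金額がtotalと一致する場合
--                     if total_amount == total and i + j + k + l < min_coins:
--                         min_coins = i + j + k + l
--                         result = (i, j, k, l)  # 現在の組み合わせを記録する
--
--     return result  # 最適な組み合わせを返す
-- ===== SOURCE B (Python) =====
-- def calc_coin(total, a, b, c, d):
--     best = None  # (count, [i, j, k, l])
--     for i in range(a + 1):
--         for j in range(b + 1):
--             for k in range(c + 1):
--                 rem = total - (i * 10 + j * 50 + k * 100)
--                 if rem >= 0 and rem % 500 == 0:
--                     l = rem // 500
--                     if l <= d:
--                         cnt = i + j + k + l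
--                         if best is None or cnt < best[0]:
--                             best = (cnt, (i, j, k, l))
--     return None if best is None else best[1]
-- ===== Notes on version B (the rewrite author's own statement) =====
-- stated objective: faster
-- what changed: The innermost 500-yen loop is removed: for each (i,j,k) the unique candidate l is computed directly from the remainder total - (10i+50j+100k) by divisibility, turning O(a*b*c*d) enumeration into O(a*b*c).
import Mathlib
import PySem

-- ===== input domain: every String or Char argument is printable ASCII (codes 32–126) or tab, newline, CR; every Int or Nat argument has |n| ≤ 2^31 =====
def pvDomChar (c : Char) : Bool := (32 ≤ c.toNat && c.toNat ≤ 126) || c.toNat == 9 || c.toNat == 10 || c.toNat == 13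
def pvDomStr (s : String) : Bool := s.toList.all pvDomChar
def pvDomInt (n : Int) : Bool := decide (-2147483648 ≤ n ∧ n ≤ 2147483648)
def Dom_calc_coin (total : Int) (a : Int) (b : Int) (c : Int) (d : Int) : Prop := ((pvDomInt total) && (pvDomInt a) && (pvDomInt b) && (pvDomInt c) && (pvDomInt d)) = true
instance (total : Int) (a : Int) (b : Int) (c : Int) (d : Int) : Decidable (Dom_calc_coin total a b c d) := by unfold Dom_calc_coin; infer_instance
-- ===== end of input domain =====

-- B removes A's innermost 500-yen loop by solving l directly from the remainder (O(abc) vs O(abcd)); return values proved equal.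

-- ===== PORT A =====
-- min_coins = float('inf') is modelled as (none : Option Int); 'x < min_coins' is ltInfA.
def ltInfA (x : Int) (m : Option Int) : Bool :=
  match m with
  | none => true
  | some v => x < v

def stepA (total i j k : Int) (st : Option Int × Option (List Int)) (l : Int) :
    Option Int × Option (List Int) :=
  let total_amount := i * 10 + j * 50 + k * 100 + l * 500
  if total_amount == total && ltInfA (i + j + k + l) st.1 then
    (some (i + j + k + l), some [i, j, k, l])
  else st

def calc_coin (total : Int) (a : Int) (b : Int) (c : Int) (d : Int) : Option (List Int) :=
  ((PySem.List.pyRange 0 (a + 1) 1).foldl (fun st i =>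
      (PySem.List.pyRange 0 (b + 1) 1).foldl (fun st j =>
        (PySem.List.pyRange 0 (c + 1) 1).foldl (fun st k =>
          (PySem.List.pyRange 0 (d + 1) 1).foldl (stepA total i j k) st) st) st)
      ((none : Option Int), (none : Option (List Int)))).2

-- ===== PORT B =====
def stepB (total d : Int) (s : Option (Int × List Int)) (i j k : Int) :
    Option (Int × List Int) :=
  let rem := total - (i * 10 + j * 50 + k * 100)
  if rem ≥ 0 ∧ PySem.Int.mod rem 500 = 0 then
    let l := PySem.Int.floordiv rem 500
    if l ≤ d then
      let cnt := i + j + k + l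
      match s with
      | none => some (cnt, [i, j, k, l])
      | some (bc, br) => if cnt < bc then some (cnt, [i, j, k, l]) else some (bc, br)
    else s
  else s

def calc_coin_alt (total : Int) (a : Int) (b : Int) (c : Int) (d : Int) : Option (List Int) :=
  match
    (PySem.List.pyRange 0 (a + 1) 1).foldl (fun s i =>
      (PySem.List.pyRange 0 (b + 1) 1).foldl (fun s j =>
        (PySem.List.pyRange 0 (c + 1) 1).foldl (fun s k => stepB total d s i j k) s) s)
      (none : Option (Int × List Int)) with
  | none => none
  | some (_, r) => some r

-- ===== PRECONDITION & SPEC =====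
def Spec_calc_coin (total : Int) (a : Int) (b : Int) (c : Int) (d : Int) (out : Option (List Int)) : Prop := out = calc_coin_alt total a b c d
instance (total : Int) (a : Int) (b : Int) (c : Int) (d : Int) (out : Option (List Int)) : Decidable (Spec_calc_coin total a b c d out) := by unfold Spec_calc_coin; infer_instance

-- ===== CLAIM (what is proved, stated in full; the proofs are below) =====
def Claim_equal_calc_coin : Prop := ∀ (total : Int) (a : Int) (b : Int) (c : Int) (d : Int), Dom_calc_coin total a b c d → Spec_calc_coin total a b c d (calc_coin total a b c d)

-- ===== LEMMAS AND PROOFS =====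

-- the state correspondence: A's (min_coins, result) pair is the image of B's packed best
def phi (s : Option (Int × List Int)) : Option Int × Option (List Int) :=
  match s with
  | none => (none, none)
  | some (cnt, r) => (some cnt, some r)

-- fold over a list where f is the identity on every element except possibly t (t occurring at most once)
theorem foldl_once {S : Type} (f : S → Int → S) (t : Int) :
    ∀ (L : List Int) (s : S), (∀ l ∈ L, l ≠ t → ∀ s', f s' l = s') → L.count t ≤ 1 →
      L.foldl f s = if t ∈ L then f s t else s := by
  intro L
  induction L with
  | nil => intro s _ _; simp
  | cons x xs ih =>
    intro s hid hcnt
    by_cases hx : x = t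
    · subst hx
      have hc : xs.count x = 0 := by
        rw [List.count_cons_self] at hcnt; omega
      have hnot : x ∉ xs := by
        rw [← List.count_eq_zero]; exact hc
      have hrest : xs.foldl f (f s x) = f s x := by
        rw [ih (f s x) (fun l hl hne s' => hid l (List.mem_cons_of_mem _ hl) hne s')
            (by omega)]
        simp [hnot]
      simp [List.foldl_cons, hrest]
    · have hfs : f s x = s := hid x (List.mem_cons_self) hx s
      have hcnt' : xs.count t ≤ 1 := by
        rw [List.count_cons] at hcnt
        split at hcnt <;> omega
      rw [List.foldl_cons, hfs,
        ih s (fun l hl hne s' => hid l (List.mem_cons_of_mem _ hl) hne s') hcnt']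
      have hmem : (t ∈ x :: xs) ↔ (t ∈ xs) := by
        simp only [List.mem_cons]
        constructor
        · rintro (h | h)
          · exact absurd h.symm hx
          · exact h
        · exact Or.inr
      simp [hmem]

theorem count_pyRange_le_one (a b t : Int) :
    (PySem.List.pyRange a b 1).count t ≤ 1 :=
  (List.nodup_iff_count_le_one.mp (PySem.List.nodup_pyRange_one a b)) t

-- inner l-loop of A equals B's direct step, through phi
theorem inner_loop_eq (total d i j k : Int) (s : Option (Int × List Int)) :
    (PySem.List.pyRange 0 (d + 1) 1).foldl (stepA total i j k) (phi s) =
      phi (stepB total d s i j k) := by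
  by_cases hdiv : total - (i * 10 + j * 50 + k * 100) ≥ 0 ∧
      PySem.Int.mod (total - (i * 10 + j * 50 + k * 100)) 500 = 0
  · obtain ⟨hpos, hmod⟩ := hdiv
    have hmul : PySem.Int.floordiv (total - (i * 10 + j * 50 + k * 100)) 500 * 500 =
        total - (i * 10 + j * 50 + k * 100) := by
      have h1 := PySem.Int.floordiv_mul_add_mod (total - (i * 10 + j * 50 + k * 100)) 500
      rw [hmod] at h1
      omega
    have hl0nn : 0 ≤ PySem.Int.floordiv (total - (i * 10 + j * 50 + k * 100)) 500 := by omega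
    have honly : ∀ l ∈ PySem.List.pyRange 0 (d+1) 1,
        l ≠ PySem.Int.floordiv (total - (i * 10 + j * 50 + k * 100)) 500 →
        ∀ s', stepA total i j k s' l = s' := by
      intro l _ hne s'
      unfold stepA
      have hno : ¬ (i * 10 + j * 50 + k * 100 + l * 500 = total) := by
        intro h
        apply hne
        have : l * 500 =
            PySem.Int.floordiv (total - (i * 10 + j * 50 + k * 100)) 500 * 500 := by omega
        omega
      simp [hno]
    rw [foldl_once _ _ _ _ honly (count_pyRange_le_one _ _ _)]
    by_cases hld : PySem.Int.floordiv (total - (i * 10 + j * 50 + k * 100)) 500 ≤ d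
    · have hmem : PySem.Int.floordiv (total - (i * 10 + j * 50 + k * 100)) 500 ∈
          PySem.List.pyRange 0 (d+1) 1 := by
        rw [PySem.List.mem_pyRange_one]
        omega
      rw [if_pos hmem]
      have hstepB : stepB total d s i j k =
          (let l := PySem.Int.floordiv (total - (i * 10 + j * 50 + k * 100)) 500
           let cnt := i + j + k + l
           match s with
           | none => some (cnt, [i, j, k, l])
           | some (bc, br) => if cnt < bc then some (cnt, [i, j, k, l]) else some (bc, br)) := by
        unfold stepB
        rw [if_pos ⟨hpos, hmod⟩, if_pos hld]
      rw [hstepB]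
      unfold stepA
      have heq : i * 10 + j * 50 + k * 100 +
          PySem.Int.floordiv (total - (i * 10 + j * 50 + k * 100)) 500 * 500 = total := by
        omega
      have hfe : PySem.Int.floordiv (total - (i * 10 + j * 50 + k * 100)) 500 =
          (total - (i * 10 + j * 50 + k * 100)) / 500 :=
        PySem.Int.floordiv_eq_ediv_of_pos (by norm_num)
      rw [hfe] at heq
      cases s with
      | none => simp [phi, heq, ltInfA]
      | some p =>
        obtain ⟨bc, br⟩ := p
        by_cases hlt : i + j + k + PySem.Int.floordiv (total - (i * 10 + j * 50 + k * 100)) 500 < bc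
        · rw [hfe] at hlt; simp [phi, heq, ltInfA, hlt]
        · rw [hfe] at hlt; simp [phi, heq, ltInfA, hlt]
    · have hnmem : PySem.Int.floordiv (total - (i * 10 + j * 50 + k * 100)) 500 ∉
          PySem.List.pyRange 0 (d+1) 1 := by
        rw [PySem.List.mem_pyRange_one]
        omega
      rw [if_neg hnmem]
      have hstepB : stepB total d s i j k = s := by
        unfold stepB
        rw [if_pos ⟨hpos, hmod⟩, if_neg hld]
      rw [hstepB]
  · -- no l in the range can reach the target amount
    have honly : ∀ l ∈ PySem.List.pyRange 0 (d+1) 1, l ≠ d + 1 →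
        ∀ s', stepA total i j k s' l = s' := by
      intro l hl _ s'
      unfold stepA
      have hl' := (PySem.List.mem_pyRange_one).mp hl
      have hno : ¬ (i * 10 + j * 50 + k * 100 + l * 500 = total) := by
        intro h
        apply hdiv
        constructor
        · omega
        · have hd : (500 : Int) ∣ (total - (i * 10 + j * 50 + k * 100)) :=
            ⟨l, by omega⟩
          exact (PySem.Int.mod_eq_zero_iff_dvd _ _).mpr hd
      simp [hno]
    rw [foldl_once _ (d + 1) _ _ honly (count_pyRange_le_one _ _ _)]
    have hnmem : (d + 1) ∉ PySem.List.pyRange 0 (d+1) 1 := by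
      rw [PySem.List.mem_pyRange_one]
      omega
    rw [if_neg hnmem]
    have hstepB : stepB total d s i j k = s := by
      unfold stepB
      rw [if_neg hdiv]
    rw [hstepB]

theorem foldl_phi {f : Option Int × Option (List Int) → Int → Option Int × Option (List Int)}
    {g : Option (Int × List Int) → Int → Option (Int × List Int)}
    (h : ∀ s l, f (phi s) l = phi (g s l)) :
    ∀ (L : List Int) (s : Option (Int × List Int)), L.foldl f (phi s) = phi (L.foldl g s) := by
  intro L
  induction L with
  | nil => intro s; simp
  | cons x xs ih => intro s; simp [List.foldl_cons, h, ih]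

-- ===== VERDICT (by name: the statement is the Claim_ definition above) =====
theorem calc_coin_spec : Claim_equal_calc_coin := by
  intro total a b c d _
  unfold Spec_calc_coin calc_coin calc_coin_alt
  have h :
      (PySem.List.pyRange 0 (a + 1) 1).foldl (fun st i =>
        (PySem.List.pyRange 0 (b + 1) 1).foldl (fun st j =>
          (PySem.List.pyRange 0 (c + 1) 1).foldl (fun st k =>
            (PySem.List.pyRange 0 (d + 1) 1).foldl (stepA total i j k) st) st) st)
        (phi none) =
      phi ((PySem.List.pyRange 0 (a + 1) 1).foldl (fun s i =>
        (PySem.List.pyRange 0 (b + 1) 1).foldl (fun s j =>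
          (PySem.List.pyRange 0 (c + 1) 1).foldl (fun s k => stepB total d s i j k) s) s)
        none) := by
    apply foldl_phi
    intro s i
    apply foldl_phi
    intro s j
    apply foldl_phi
    intro s k
    exact inner_loop_eq total d i j k s
  rw [show ((none : Option Int), (none : Option (List Int))) = phi none from rfl, h]
  cases hb : (PySem.List.pyRange 0 (a + 1) 1).foldl (fun s i =>
        (PySem.List.pyRange 0 (b + 1) 1).foldl (fun s j =>
          (PySem.List.pyRange 0 (c + 1) 1).foldl (fun s k => stepB total d s i j k) s) s)
        (none : Option (Int × List Int)) with
  | none => simp [phi]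
  | some p => obtain ⟨cnt, r⟩ := p; simp [phi]
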